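-- pv_equiv track=rewrite | github.com/ohadren-source/rilie-net | speech_coherence.py | has_clear_subject
-- ===== SOURCE A (Python) =====
-- def has_clear_subject(sentence: str) -> bool:
--     """Check if sentence has identifiable subject."""
--     if not sentence:
--         return False
--     sentence = sentence.strip()
--     subject_starts = [
--         "i ", "you ", "he ", "she ", "it ", "we ", "they ",
--         "this ", "that ", "these ", "those ",
--         "what ", "which ", "who ",
--     ]
--     s_lower = sentence.lower()
--     if any(s_lower.startswith(sub) for sub in subject_starts):
--         return True
--     imperatives = [
--         "go ", "come ", "bring ", "take ", "make ", "get ",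
--         "tell ", "ask ", "try ", "keep ",
--     ]
--     if any(s_lower.startswith(imp) for imp in imperatives):
--         return True
--     return False
-- ===== SOURCE B (Python) =====
-- _FIRST_WORDS = frozenset([
--     "i", "you", "he", "she", "it", "we", "they",
--     "this", "that", "these", "those",
--     "what", "which", "who",
--     "go", "come", "bring", "take", "make", "get",
--     "tell", "ask", "try", "keep",
-- ])
--
--
-- def has_clear_subject(sentence: str) -> bool:
--     """Check if sentence has identifiable subject."""
--     s = sentence.strip().lower()
--     i = s.find(" ")
--     return i != -1 and s[:i] in _FIRST_WORDS
-- ===== Notes on version B (the rewrite author's own statement) =====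
-- stated objective: simpler
-- what changed: Instead of scanning two lists of 24 space-terminated prefixes with startswith, B locates the first space once with find, takes the text before it as the first token, and does a single membership lookup in one frozenset of bare words.
import Mathlib
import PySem

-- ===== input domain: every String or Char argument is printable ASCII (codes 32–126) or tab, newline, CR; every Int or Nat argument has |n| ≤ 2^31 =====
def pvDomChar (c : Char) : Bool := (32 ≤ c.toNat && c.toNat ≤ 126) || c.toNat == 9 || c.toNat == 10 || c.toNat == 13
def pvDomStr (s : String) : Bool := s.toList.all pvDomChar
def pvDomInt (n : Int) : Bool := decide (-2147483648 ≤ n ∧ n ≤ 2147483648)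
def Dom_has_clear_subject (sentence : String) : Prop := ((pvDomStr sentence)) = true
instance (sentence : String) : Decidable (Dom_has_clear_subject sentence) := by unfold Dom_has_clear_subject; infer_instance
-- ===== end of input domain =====

-- B replaces the 24-prefix startswith scan by extracting the first token once
-- (the text before the first space) and one set-membership lookup on bare words (objective: simpler).

-- ===== PORT A =====
def pvSubjectStarts : List String :=
  ["i ", "you ", "he ", "she ", "it ", "we ", "they ",
   "this ", "that ", "these ", "those ",
   "what ", "which ", "who "]

def pvImperatives : List String :=
  ["go ", "come ", "bring ", "take ", "make ", "get ",
   "tell ", "ask ", "try ", "keep "]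

def has_clear_subject (sentence : String) : Bool :=
  if sentence == "" then false
  else
    let sentence := PySem.Str.strip sentence
    let s_lower := PySem.Str.lower sentence
    if pvSubjectStarts.any (fun sub => PySem.Str.startswith s_lower sub) then true
    else if pvImperatives.any (fun imp => PySem.Str.startswith s_lower imp) then true
    else false

-- ===== PORT B =====
def pvFirstWords : PySem.Set String :=
  PySem.Set.ofList
    ["i", "you", "he", "she", "it", "we", "they",
     "this", "that", "these", "those",
     "what", "which", "who",
     "go", "come", "bring", "take", "make", "get",
     "tell", "ask", "try", "keep"]

def has_clear_subject_alt (sentence : String) : Bool :=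
  let s := PySem.Str.lower (PySem.Str.strip sentence)
  let i := PySem.Str.find s " "
  (i != -1) && PySem.Set.contains pvFirstWords (PySem.Str.slice s none (some i))

-- ===== PRECONDITION & SPEC =====
def Spec_has_clear_subject (sentence : String) (out : Bool) : Prop := out = has_clear_subject_alt sentence
instance (sentence : String) (out : Bool) : Decidable (Spec_has_clear_subject sentence out) := by unfold Spec_has_clear_subject; infer_instance

-- ===== CLAIM (what is proved, stated in full; the proofs are below) =====
def Claim_equal_has_clear_subject : Prop := ∀ (sentence : String), Dom_has_clear_subject sentence → Spec_has_clear_subject sentence (has_clear_subject sentence)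

-- ===== LEMMAS AND PROOFS =====

lemma singleton_prefix_iff_head? {α : Type} (a : α) (xs : List α) :
    [a] <+: xs ↔ xs.head? = some a := by
  cases xs with
  | nil => simp
  | cons x t =>
    constructor
    · rintro ⟨u, hu⟩
      simp at hu
      simp [hu.1]
    · intro h
      simp at h
      exact ⟨t, by simp [h]⟩

-- The heart of the equivalence: for a word w without spaces,
-- "l starts with w followed by a space" ↔ "l has a space and the text before the first space is w".
lemma prefix_word_iff (w l : List Char) (hw : ' ' ∉ w) :
    ((w ++ [' ']) <+: l) ↔
      (0 ≤ PySem.Chars.find l [' '] ∧ l.take (PySem.Chars.find l [' ']).toNat = w) := by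
  constructor
  · rintro ⟨t, ht⟩
    rw [List.append_assoc] at ht
    have hmem : ' ' ∈ l := by rw [← ht]; simp
    have hinf : [' '] <:+: l := by
      obtain ⟨pre, suf, hps⟩ := List.append_of_mem hmem
      exact ⟨pre, suf, by simp [hps]⟩
    have h0 : 0 ≤ PySem.Chars.find l [' '] := (PySem.Chars.find_nonneg_iff l [' ']).mpr hinf
    obtain ⟨hpre, hmin⟩ := PySem.Chars.find_spec h0
    set n := (PySem.Chars.find l [' ']).toNat with hn
    have hdw : l.drop w.length = ' ' :: t := by rw [← ht]; simp
    have heq : n = w.length := by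
      rcases Nat.lt_or_ge n w.length with hlt | hge
      · exfalso
        have hhead : (l.drop n).head? = some ' ' := (singleton_prefix_iff_head? _ _).mp hpre
        have hdrop : l.drop n = w.drop n ++ (' ' :: t) := by
          rw [← ht, List.drop_append_of_le_length (by omega)]; rfl
        have hwn : (w.drop n).head? = some w[n] := by
          rw [List.head?_drop]; simp [hlt]
        rw [hdrop, List.head?_append_of_ne_nil _ (by
          intro hnil
          have hlen := congrArg List.length hnil
          simp at hlen; omega), hwn] at hhead
        have : w[n] = ' ' := by injection hhead
        exact hw (this ▸ List.getElem_mem _)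
      · have : ¬ w.length < n := fun hlt => hmin w.length hlt ⟨t, by simp [hdw]⟩
        omega
    refine ⟨h0, ?_⟩
    rw [heq, ← ht, List.take_append_of_le_length (le_refl _)]
    simp
  · rintro ⟨h0, htake⟩
    obtain ⟨hpre, -⟩ := PySem.Chars.find_spec h0
    obtain ⟨u, hu⟩ := hpre
    refine ⟨u, ?_⟩
    calc (w ++ [' ']) ++ u = w ++ ([' '] ++ u) := by simp
    _ = l.take (PySem.Chars.find l [' ']).toNat ++ l.drop (PySem.Chars.find l [' ']).toNat := by
        rw [htake, hu]
    _ = l := List.take_append_drop _ _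

lemma string_eq_iff_toList {s t : String} : s = t ↔ s.toList = t.toList :=
  ⟨fun h => h ▸ rfl, fun h => String.ext h⟩

-- Per-word form on strings: ws is w plus a trailing space.
lemma word_case (s w ws : String) (hws : ws.toList = w.toList ++ [' ']) (hw : ' ' ∉ w.toList) :
    (PySem.Str.startswith s ws = true) ↔
      (0 ≤ PySem.Chars.find s.toList [' '] ∧
        s.toList.take (PySem.Chars.find s.toList [' ']).toNat = w.toList) := by
  rw [PySem.Str.startswith_eq, PySem.Chars.startswith_iff, hws]
  exact prefix_word_iff w.toList s.toList hw

-- The whole comparison, over an arbitrary string (applied to the stripped+lowered sentence).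
lemma main_eq (s : String) :
    (pvSubjectStarts.any (fun sub => PySem.Str.startswith s sub) ||
      pvImperatives.any (fun imp => PySem.Str.startswith s imp)) =
    ((PySem.Str.find s " " != -1) &&
      PySem.Set.contains pvFirstWords (PySem.Str.slice s none (some (PySem.Str.find s " ")))) := by
  rw [Bool.eq_iff_iff]
  have hfind : PySem.Str.find s " " = PySem.Chars.find s.toList [' '] := PySem.Str.find_eq s " "
  have hneg1 : -1 ≤ PySem.Chars.find s.toList [' '] := PySem.Chars.neg_one_le_find _ _
  constructor
  · intro h
    have h' : ∃ w ∈ (pvFirstWords : List String),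
        0 ≤ PySem.Chars.find s.toList [' '] ∧
        s.toList.take (PySem.Chars.find s.toList [' ']).toNat = w.toList := by
      simp only [pvSubjectStarts, pvImperatives, List.any_cons, List.any_nil,
        Bool.or_eq_true] at h
      rcases h with ((h|h|h|h|h|h|h|h|h|h|h|h|h|h|h)|(h|h|h|h|h|h|h|h|h|h|h)) <;>
        [ exact ⟨"i", by decide, (word_case s "i" _ rfl (by decide)).mp h⟩;
          exact ⟨"you", by decide, (word_case s "you" _ rfl (by decide)).mp h⟩;
          exact ⟨"he", by decide, (word_case s "he" _ rfl (by decide)).mp h⟩;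
          exact ⟨"she", by decide, (word_case s "she" _ rfl (by decide)).mp h⟩;
          exact ⟨"it", by decide, (word_case s "it" _ rfl (by decide)).mp h⟩;
          exact ⟨"we", by decide, (word_case s "we" _ rfl (by decide)).mp h⟩;
          exact ⟨"they", by decide, (word_case s "they" _ rfl (by decide)).mp h⟩;
          exact ⟨"this", by decide, (word_case s "this" _ rfl (by decide)).mp h⟩;
          exact ⟨"that", by decide, (word_case s "that" _ rfl (by decide)).mp h⟩;
          exact ⟨"these", by decide, (word_case s "these" _ rfl (by decide)).mp h⟩;
          exact ⟨"those", by decide, (word_case s "those" _ rfl (by decide)).mp h⟩;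
          exact ⟨"what", by decide, (word_case s "what" _ rfl (by decide)).mp h⟩;
          exact ⟨"which", by decide, (word_case s "which" _ rfl (by decide)).mp h⟩;
          exact ⟨"who", by decide, (word_case s "who" _ rfl (by decide)).mp h⟩;
          exact absurd h (by simp);
          exact ⟨"go", by decide, (word_case s "go" _ rfl (by decide)).mp h⟩;
          exact ⟨"come", by decide, (word_case s "come" _ rfl (by decide)).mp h⟩;
          exact ⟨"bring", by decide, (word_case s "bring" _ rfl (by decide)).mp h⟩;
          exact ⟨"take", by decide, (word_case s "take" _ rfl (by decide)).mp h⟩;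
          exact ⟨"make", by decide, (word_case s "make" _ rfl (by decide)).mp h⟩;
          exact ⟨"get", by decide, (word_case s "get" _ rfl (by decide)).mp h⟩;
          exact ⟨"tell", by decide, (word_case s "tell" _ rfl (by decide)).mp h⟩;
          exact ⟨"ask", by decide, (word_case s "ask" _ rfl (by decide)).mp h⟩;
          exact ⟨"try", by decide, (word_case s "try" _ rfl (by decide)).mp h⟩;
          exact ⟨"keep", by decide, (word_case s "keep" _ rfl (by decide)).mp h⟩;
          exact absurd h (by simp) ]
    obtain ⟨w, hwmem, h0, htake⟩ := h'
    have hslice : (PySem.Str.slice s none (some (PySem.Str.find s " "))).toList =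
        s.toList.take (PySem.Chars.find s.toList [' ']).toNat := by
      rw [PySem.Str.toList_slice, hfind]
      simp [PySem.List.slice_to _ (by omega : (0:Int) ≤ PySem.Chars.find s.toList [' '])]
    have htokw : PySem.Str.slice s none (some (PySem.Str.find s " ")) = w :=
      string_eq_iff_toList.mpr (by rw [hslice, htake])
    simp only [Bool.and_eq_true, bne_iff_ne, ne_eq, hfind]
    refine ⟨by omega, ?_⟩
    rw [← hfind, htokw]
    simp only [PySem.Set.contains]
    exact List.elem_eq_true_of_mem hwmem
  · intro h
    simp only [Bool.and_eq_true, bne_iff_ne, ne_eq, hfind] at h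
    obtain ⟨hne1, hmem⟩ := h
    have h0 : 0 ≤ PySem.Chars.find s.toList [' '] := by omega
    have hslice : (PySem.Str.slice s none (some (PySem.Str.find s " "))).toList =
        s.toList.take (PySem.Chars.find s.toList [' ']).toNat := by
      rw [PySem.Str.toList_slice, hfind]
      simp [PySem.List.slice_to _ h0]
    have hmem' : PySem.Str.slice s none (some (PySem.Str.find s " ")) ∈ (pvFirstWords : List String) := by
      simp only [PySem.Set.contains] at hmem
      exact List.mem_of_elem_eq_true hmem
    have htake : ∀ w : String, PySem.Str.slice s none (some (PySem.Str.find s " ")) = w →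
        s.toList.take (PySem.Chars.find s.toList [' ']).toNat = w.toList := by
      intro w hw
      rw [← hslice, hw]
    simp only [pvSubjectStarts, pvImperatives, List.any_cons, List.any_nil, Bool.or_eq_true]
    have hlist : (pvFirstWords : List String) =
        ["i", "you", "he", "she", "it", "we", "they", "this", "that", "these", "those",
         "what", "which", "who", "go", "come", "bring", "take", "make", "get",
         "tell", "ask", "try", "keep"] := by decide
    rw [hlist] at hmem'
    simp only [List.mem_cons, List.not_mem_nil, or_false] at hmem'
    rcases hmem' with h|h|h|h|h|h|h|h|h|h|h|h|h|h|h|h|h|h|h|h|h|h|h|h <;>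
      [ exact Or.inl (Or.inl ((word_case s "i" _ rfl (by decide)).mpr ⟨h0, htake _ h⟩));
        exact Or.inl (Or.inr (Or.inl ((word_case s "you" _ rfl (by decide)).mpr ⟨h0, htake _ h⟩)));
        exact Or.inl (Or.inr (Or.inr (Or.inl ((word_case s "he" _ rfl (by decide)).mpr ⟨h0, htake _ h⟩))));
        exact Or.inl (Or.inr (Or.inr (Or.inr (Or.inl ((word_case s "she" _ rfl (by decide)).mpr ⟨h0, htake _ h⟩)))));
        exact Or.inl (Or.inr (Or.inr (Or.inr (Or.inr (Or.inl ((word_case s "it" _ rfl (by decide)).mpr ⟨h0, htake _ h⟩))))));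
        exact Or.inl (Or.inr (Or.inr (Or.inr (Or.inr (Or.inr (Or.inl ((word_case s "we" _ rfl (by decide)).mpr ⟨h0, htake _ h⟩)))))));
        exact Or.inl (Or.inr (Or.inr (Or.inr (Or.inr (Or.inr (Or.inr (Or.inl ((word_case s "they" _ rfl (by decide)).mpr ⟨h0, htake _ h⟩))))))));
        exact Or.inl (Or.inr (Or.inr (Or.inr (Or.inr (Or.inr (Or.inr (Or.inr (Or.inl ((word_case s "this" _ rfl (by decide)).mpr ⟨h0, htake _ h⟩)))))))));
        exact Or.inl (Or.inr (Or.inr (Or.inr (Or.inr (Or.inr (Or.inr (Or.inr (Or.inr (Or.inl ((word_case s "that" _ rfl (by decide)).mpr ⟨h0, htake _ h⟩))))))))));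
        exact Or.inl (Or.inr (Or.inr (Or.inr (Or.inr (Or.inr (Or.inr (Or.inr (Or.inr (Or.inr (Or.inl ((word_case s "these" _ rfl (by decide)).mpr ⟨h0, htake _ h⟩)))))))))));
        exact Or.inl (Or.inr (Or.inr (Or.inr (Or.inr (Or.inr (Or.inr (Or.inr (Or.inr (Or.inr (Or.inr (Or.inl ((word_case s "those" _ rfl (by decide)).mpr ⟨h0, htake _ h⟩))))))))))));
        exact Or.inl (Or.inr (Or.inr (Or.inr (Or.inr (Or.inr (Or.inr (Or.inr (Or.inr (Or.inr (Or.inr (Or.inr (Or.inl ((word_case s "what" _ rfl (by decide)).mpr ⟨h0, htake _ h⟩)))))))))))));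
        exact Or.inl (Or.inr (Or.inr (Or.inr (Or.inr (Or.inr (Or.inr (Or.inr (Or.inr (Or.inr (Or.inr (Or.inr (Or.inr (Or.inl ((word_case s "which" _ rfl (by decide)).mpr ⟨h0, htake _ h⟩))))))))))))));
        exact Or.inl (Or.inr (Or.inr (Or.inr (Or.inr (Or.inr (Or.inr (Or.inr (Or.inr (Or.inr (Or.inr (Or.inr (Or.inr (Or.inr (Or.inl ((word_case s "who" _ rfl (by decide)).mpr ⟨h0, htake _ h⟩)))))))))))))));
        exact Or.inr (Or.inl ((word_case s "go" _ rfl (by decide)).mpr ⟨h0, htake _ h⟩));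
        exact Or.inr (Or.inr (Or.inl ((word_case s "come" _ rfl (by decide)).mpr ⟨h0, htake _ h⟩)));
        exact Or.inr (Or.inr (Or.inr (Or.inl ((word_case s "bring" _ rfl (by decide)).mpr ⟨h0, htake _ h⟩))));
        exact Or.inr (Or.inr (Or.inr (Or.inr (Or.inl ((word_case s "take" _ rfl (by decide)).mpr ⟨h0, htake _ h⟩)))));
        exact Or.inr (Or.inr (Or.inr (Or.inr (Or.inr (Or.inl ((word_case s "make" _ rfl (by decide)).mpr ⟨h0, htake _ h⟩))))));
        exact Or.inr (Or.inr (Or.inr (Or.inr (Or.inr (Or.inr (Or.inl ((word_case s "get" _ rfl (by decide)).mpr ⟨h0, htake _ h⟩)))))));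
        exact Or.inr (Or.inr (Or.inr (Or.inr (Or.inr (Or.inr (Or.inr (Or.inl ((word_case s "tell" _ rfl (by decide)).mpr ⟨h0, htake _ h⟩))))))));
        exact Or.inr (Or.inr (Or.inr (Or.inr (Or.inr (Or.inr (Or.inr (Or.inr (Or.inl ((word_case s "ask" _ rfl (by decide)).mpr ⟨h0, htake _ h⟩)))))))));
        exact Or.inr (Or.inr (Or.inr (Or.inr (Or.inr (Or.inr (Or.inr (Or.inr (Or.inr (Or.inl ((word_case s "try" _ rfl (by decide)).mpr ⟨h0, htake _ h⟩))))))))));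
        exact Or.inr (Or.inr (Or.inr (Or.inr (Or.inr (Or.inr (Or.inr (Or.inr (Or.inr (Or.inr (Or.inl (((word_case s "keep" _ rfl (by decide)).mpr ⟨h0, htake _ h⟩)))))))))))) ]

lemma if_if_or (a b : Bool) :
    (if a = true then true else if b = true then true else false) = (a || b) := by
  cases a <;> cases b <;> rfl

-- ===== VERDICT (by name: the statement is the Claim_ definition above) =====
theorem has_clear_subject_spec : Claim_equal_has_clear_subject := by
  intro sentence _
  unfold Spec_has_clear_subject
  by_cases hs : sentence = ""
  · subst hs; decide
  · unfold has_clear_subject has_clear_subject_alt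
    rw [if_neg (by simpa using hs)]
    rw [if_if_or]
    exact main_eq (PySem.Str.lower (PySem.Str.strip sentence))
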